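-- pv_equiv track=rewrite | github.com/acarrasco/advent_of_code | 2022/day18/part2.py | solve
-- ===== SOURCE A (Python) =====
-- FACE_DIRECTIONS = [
--     (0, 0, 1),
--     (0, 1, 0),
--     (1, 0, 0),
--     (0, 0, -1),
--     (0, -1, 0),
--     (-1, 0, 0),
-- ]
--
-- def solve(cubes):
--     minx = min(x for x,y,z in cubes) - 1
--     miny = min(y for x,y,z in cubes) - 1
--     minz = min(z for x,y,z in cubes) - 1
--     maxx = max(x for x,y,z in cubes) + 1
--     maxy = max(y for x,y,z in cubes) + 1
--     maxz = max(z for x,y,z in cubes) + 1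
--
--     def adjacent(x, y, z):
--         for dx, dy, dz in FACE_DIRECTIONS:
--             nx, ny, nz = x + dx, y + dy, z + dz
--             if minx <= nx <= maxx and miny <= ny <= maxy and minz <= nz <= maxz:
--                 yield nx, ny, nz
--
--     visible_faces = 0
--     pending = set([(minx, miny, minz)])
--     visited = set()
--     while pending:
--         next_pending = set()
--         for p in pending:
--             visited.add(p)
--             for n in adjacent(*p):
--                 if n in visited:
--                     continue
--                 if n in cubes:
--                     visible_faces += 1
--                 else:
--                     next_pending.add(n)
--         pending = next_pending
--     return visible_faces
-- ===== SOURCE B (Python) =====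
-- FACE_DIRECTIONS = [
--     (0, 0, 1),
--     (0, 1, 0),
--     (1, 0, 0),
--     (0, 0, -1),
--     (0, -1, 0),
--     (-1, 0, 0),
-- ]
--
-- def solve(cubes):
--     minx = min(x for x, y, z in cubes) - 1
--     miny = min(y for x, y, z in cubes) - 1
--     minz = min(z for x, y, z in cubes) - 1
--     maxx = max(x for x, y, z in cubes) + 1
--     maxy = max(y for x, y, z in cubes) + 1
--     maxz = max(z for x, y, z in cubes) + 1
--
--     cube_set = set(cubes)
--
--     # Iterative depth-first traversal with an explicit stack, marking cells
--     # when they are pushed: no frontier levels and no counting inside the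
--     # traversal.  `seen` ends up as exactly the exterior air cells.
--     seen = {(minx, miny, minz)}
--     stack = [(minx, miny, minz)]
--     while stack:
--         x, y, z = stack.pop()
--         for dx, dy, dz in FACE_DIRECTIONS:
--             n = (x + dx, y + dy, z + dz)
--             if (minx <= n[0] <= maxx and miny <= n[1] <= maxy
--                     and minz <= n[2] <= maxz
--                     and n not in seen and n not in cube_set):
--                 seen.add(n)
--                 stack.append(n)
--
--     # Separate counting pass: a face is exterior iff its neighbouring cell
--     # is exterior air.
--     return sum((x + dx, y + dy, z + dz) in seen
--                for x, y, z in cube_set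
--                for dx, dy, dz in FACE_DIRECTIONS)
-- ===== Notes on version B (the rewrite author's own statement) =====
-- stated objective: faster
-- what changed: A runs a frontier-based level-by-level BFS (pending/next_pending sets) and counts cube faces inside the traversal, testing 'n in cubes' by scanning the cube list per face; B traverses with an explicit-stack iterative DFS marking cells on push (no frontier levels, no counting in the loop, cube membership via a hash set built once), then counts exterior faces in a separate pass over the distinct cubes x 6 directions against the seen-set.
import Mathlib
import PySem

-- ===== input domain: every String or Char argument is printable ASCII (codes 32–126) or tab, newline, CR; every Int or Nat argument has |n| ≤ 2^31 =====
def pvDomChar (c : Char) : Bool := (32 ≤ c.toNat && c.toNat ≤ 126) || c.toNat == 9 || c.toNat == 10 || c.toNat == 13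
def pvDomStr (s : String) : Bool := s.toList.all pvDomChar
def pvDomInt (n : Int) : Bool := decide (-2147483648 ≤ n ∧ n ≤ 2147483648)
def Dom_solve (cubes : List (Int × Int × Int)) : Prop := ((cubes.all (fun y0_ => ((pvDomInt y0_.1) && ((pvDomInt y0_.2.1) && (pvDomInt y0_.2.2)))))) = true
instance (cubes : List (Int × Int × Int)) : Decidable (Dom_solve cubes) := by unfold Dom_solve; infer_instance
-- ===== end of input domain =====

-- B replaces A's frontier-based level BFS (which counts faces during the traversal, scanning the
-- cube list for membership) by an explicit-stack iterative DFS that only collects the exterior-air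
-- set (cube membership via a set built once), followed by a separate counting pass over the
-- distinct cubes × 6 face directions.

abbrev Pt := Int × Int × Int

-- module-level constant shared by both Python versions
def faceDirections : List Pt := [(0,0,1), (0,1,0), (1,0,0), (0,0,-1), (0,-1,0), (-1,0,0)]

-- ===== PORT A =====
-- min(...)/max(...) of a generator; Python raises ValueError on an empty list — those inputs are
-- excluded by Pre_solve, the `.getD 0` is only a totalisation outside Pre_.
def pyMinD (xs : List Int) : Int := (PySem.List.min? xs (fun x => x)).getD 0
def pyMaxD (xs : List Int) : Int := (PySem.List.max? xs (fun x => x)).getD 0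

-- the `adjacent` generator: neighbours in the 6 face directions clipped to the bounding box
def aAdjacent (minx miny minz maxx maxy maxz : Int) (p : Pt) : List Pt :=
  faceDirections.filterMap (fun d =>
    let n : Pt := (p.1 + d.1, p.2.1 + d.2.1, p.2.2 + d.2.2)
    if minx ≤ n.1 ∧ n.1 ≤ maxx ∧ miny ≤ n.2.1 ∧ n.2.1 ≤ maxy ∧ minz ≤ n.2.2 ∧ n.2.2 ≤ maxz
    then some n else none)

-- body of `for n in adjacent(*p)` (visited is fixed during this inner loop).
-- `visited` is a Python set queried only by membership: ported as a hash set.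
def aInner (cubes : List Pt) (visited : Std.HashSet Pt) (st : PySem.Set Pt × Int) (n : Pt) :
    PySem.Set Pt × Int :=
  if visited.contains n then st
  else if cubes.contains n then (st.1, st.2 + 1)
  else (PySem.Set.add st.1 n, st.2)

-- body of `for p in pending`; state = (visited, next_pending, visible_faces)
def aStep (cubes : List Pt) (adj : Pt → List Pt) (st : Std.HashSet Pt × PySem.Set Pt × Int)
    (p : Pt) : Std.HashSet Pt × PySem.Set Pt × Int :=
  let visited := st.1.insert p
  let r := (adj p).foldl (aInner cubes visited) (st.2.1, st.2.2)
  (visited, r.1, r.2)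

-- `while pending:` — fuel makes the loop total; volume + 2 rounds always suffice
def aLoop (cubes : List Pt) (adj : Pt → List Pt) :
    Nat → PySem.Set Pt → Std.HashSet Pt → Int → Int
  | 0, _, _, count => count
  | fuel+1, pending, visited, count =>
    if pending = [] then count
    else
      let r := pending.foldl (aStep cubes adj) (visited, PySem.Set.empty, count)
      aLoop cubes adj fuel r.2.1 r.1 r.2.2

def solve (cubes : List Pt) : Int :=
  let minx := pyMinD (cubes.map (fun t => t.1)) - 1
  let miny := pyMinD (cubes.map (fun t => t.2.1)) - 1
  let minz := pyMinD (cubes.map (fun t => t.2.2)) - 1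
  let maxx := pyMaxD (cubes.map (fun t => t.1)) + 1
  let maxy := pyMaxD (cubes.map (fun t => t.2.1)) + 1
  let maxz := pyMaxD (cubes.map (fun t => t.2.2)) + 1
  let fuel := ((maxx - minx + 1) * (maxy - miny + 1) * (maxz - minz + 1)).toNat + 2
  aLoop cubes (aAdjacent minx miny minz maxx maxy maxz) fuel
    (PySem.Set.add PySem.Set.empty (minx, miny, minz)) (∅ : Std.HashSet Pt) 0

-- ===== PORT B =====
-- the inline bounds test `minx <= n[0] <= maxx and ...` (shared by push test and proofs)
def bInBox (minx miny minz maxx maxy maxz : Int) (n : Pt) : Bool :=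
  decide (minx ≤ n.1 ∧ n.1 ≤ maxx ∧ miny ≤ n.2.1 ∧ n.2.1 ≤ maxy ∧ minz ≤ n.2.2 ∧ n.2.2 ≤ maxz)

-- body of `for dx, dy, dz in FACE_DIRECTIONS:` while visiting cell c; state = (seen, stack).
-- `seen` is a Python set queried only by membership: ported as a hash set.
def bPush (mnx mny mnz mxx mxy mxz : Int) (cubeSet : PySem.Set Pt) (c : Pt)
    (st : Std.HashSet Pt × List Pt) (d : Pt) : Std.HashSet Pt × List Pt :=
  if bInBox mnx mny mnz mxx mxy mxz (c.1 + d.1, c.2.1 + d.2.1, c.2.2 + d.2.2)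
      && !(st.1.contains (c.1 + d.1, c.2.1 + d.2.1, c.2.2 + d.2.2))
      && !(PySem.Set.contains cubeSet (c.1 + d.1, c.2.1 + d.2.1, c.2.2 + d.2.2))
  then (st.1.insert (c.1 + d.1, c.2.1 + d.2.1, c.2.2 + d.2.2),
        (c.1 + d.1, c.2.1 + d.2.1, c.2.2 + d.2.2) :: st.2)
  else st

-- `while stack:` DFS loop; Python appends and pops at the SAME end of the list, so the stack is
-- ported with its top at the head (cons = append, head = pop): the traversal order is identical.
-- fuel makes the loop total; volume + 2 iterations always suffice.
def bLoop (mnx mny mnz mxx mxy mxz : Int) (cubeSet : PySem.Set Pt) :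
    Nat → Std.HashSet Pt × List Pt → Std.HashSet Pt
  | 0, st => st.1
  | fuel+1, st =>
    match st.2 with
    | [] => st.1
    | c :: rest =>
      bLoop mnx mny mnz mxx mxy mxz cubeSet fuel
        (faceDirections.foldl (bPush mnx mny mnz mxx mxy mxz cubeSet c) (st.1, rest))

-- final pass: sum over distinct cubes × 6 directions of faces whose neighbour is exterior air
def bCount (cubeSet : PySem.Set Pt) (ext : Std.HashSet Pt) : Int :=
  cubeSet.foldl (fun acc c => faceDirections.foldl (fun acc d =>
    if ext.contains (c.1 + d.1, c.2.1 + d.2.1, c.2.2 + d.2.2) then acc + 1 else acc)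
    acc) 0

def solve_alt (cubes : List Pt) : Int :=
  let minx := pyMinD (cubes.map (fun t => t.1)) - 1
  let miny := pyMinD (cubes.map (fun t => t.2.1)) - 1
  let minz := pyMinD (cubes.map (fun t => t.2.2)) - 1
  let maxx := pyMaxD (cubes.map (fun t => t.1)) + 1
  let maxy := pyMaxD (cubes.map (fun t => t.2.1)) + 1
  let maxz := pyMaxD (cubes.map (fun t => t.2.2)) + 1
  let cubeSet := PySem.Set.ofList cubes
  let fuel := ((maxx - minx + 1) * (maxy - miny + 1) * (maxz - minz + 1)).toNat + 2
  let seen := bLoop minx miny minz maxx maxy maxz cubeSet fuel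
    ((∅ : Std.HashSet Pt).insert (minx, miny, minz), [(minx, miny, minz)])
  bCount cubeSet seen

-- ===== PRECONDITION & SPEC =====
-- Pre_ excludes only the empty list, on which both Pythons raise ValueError (min of empty sequence).
def Pre_solve (cubes : List (Int × Int × Int)) : Prop := cubes ≠ []
instance (cubes : List (Int × Int × Int)) : Decidable (Pre_solve cubes) := by
  unfold Pre_solve; infer_instance

def pvWitness_solve : (List (Int × Int × Int)) := [(1, 2, 3), (1, 2, 4)]

def Spec_solve (cubes : List (Int × Int × Int)) (out : Int) : Prop := out = solve_alt cubes
instance (cubes : List (Int × Int × Int)) (out : Int) : Decidable (Spec_solve cubes out) := by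
  unfold Spec_solve; infer_instance

-- ===== CLAIM (what is proved, stated in full; the proofs are below) =====
def Claim_equal_solve : Prop :=
  ∀ (cubes : List (Int × Int × Int)), Dom_solve cubes → Pre_solve cubes →
    Spec_solve cubes (solve cubes)

-- ===== LEMMAS AND PROOFS =====

-- parity of a cell; a face-adjacent neighbour always has the opposite parity
def ppar (p : Pt) : Bool := decide ((p.1 + p.2.1 + p.2.2) % 2 = 0)

-- number of cube faces the air cell p sees (A's per-event increment)
def fCount (cubes : List Pt) (adj : Pt → List Pt) (p : Pt) : Int :=
  ((adj p).countP (fun n => cubes.contains n) : Nat)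

def sumF (cubes : List Pt) (adj : Pt → List Pt) (V : List Pt) : Int :=
  (V.map (fCount cubes adj)).sum

def padd (p d : Pt) : Pt := (p.1 + d.1, p.2.1 + d.2.1, p.2.2 + d.2.2)

def pneg (d : Pt) : Pt := (-d.1, -d.2.1, -d.2.2)

-- a hash set agrees with a (ghost) list of its elements
def HSfits (s : Std.HashSet Pt) (L : List Pt) : Prop := ∀ x : Pt, s.contains x = true ↔ x ∈ L

-- ghost (list-world) mirrors of A's layer collection / flood and of B's sweep loop,
-- used only in the proofs
def gCollect (inBox : Pt → Bool) (cubes E : List Pt) (nxt : PySem.Set Pt) (p : Pt) :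
    PySem.Set Pt :=
  faceDirections.foldl (fun nxt d =>
    if inBox (p.1 + d.1, p.2.1 + d.2.1, p.2.2 + d.2.2)
        && !(decide (((p.1 + d.1, p.2.1 + d.2.1, p.2.2 + d.2.2) : Pt) ∈ E))
        && !(decide (((p.1 + d.1, p.2.1 + d.2.1, p.2.2 + d.2.2) : Pt) ∈ cubes))
    then PySem.Set.add nxt (p.1 + d.1, p.2.1 + d.2.1, p.2.2 + d.2.2) else nxt) nxt

def gFlood (inBox : Pt → Bool) (cubes : List Pt) : Nat → List Pt → List Pt → List Pt
  | 0, _, E => E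
  | fuel+1, P, E =>
    if P = [] then E
    else gFlood inBox cubes fuel (P.foldl (gCollect inBox cubes (E ++ P)) PySem.Set.empty)
      (E ++ P)

def gPush (mnx mny mnz mxx mxy mxz : Int) (cubes : List Pt) (c : Pt)
    (st : List Pt × List Pt) (d : Pt) : List Pt × List Pt :=
  if bInBox mnx mny mnz mxx mxy mxz (padd c d) && !(decide (padd c d ∈ st.1))
      && !(decide (padd c d ∈ cubes))
  then (st.1 ++ [padd c d], padd c d :: st.2) else st

def gDfs (mnx mny mnz mxx mxy mxz : Int) (cubes : List Pt) : Nat → List Pt × List Pt → List Pt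
  | 0, st => st.1
  | fuel+1, st =>
    match st.2 with
    | [] => st.1
    | c :: rest =>
      gDfs mnx mny mnz mxx mxy mxz cubes fuel
        (faceDirections.foldl (gPush mnx mny mnz mxx mxy mxz cubes c) (st.1, rest))

-- the invariant carried through the lockstep induction: every in-box air cell adjacent to the
-- already-processed part E is already in E ++ P
def InvEP (inBox : Pt → Bool) (cubes E P : List Pt) : Prop :=
  ∀ y : Pt, inBox y = true → y ∉ cubes → (∃ d ∈ faceDirections, padd y d ∈ E) →
    y ∈ E ∨ y ∈ P

theorem ppar_padd (p d : Pt) (hd : d ∈ faceDirections) : ppar (padd p d) = !(ppar p) := by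
  simp only [faceDirections, List.mem_cons, List.not_mem_nil, or_false] at hd
  rcases hd with h | h | h | h | h | h <;> subst h <;>
    simp only [ppar, padd] <;>
    (by_cases h2 : (p.1 + p.2.1 + p.2.2) % 2 = 0 <;> simp [h2] <;> omega)

theorem pneg_mem (d : Pt) (hd : d ∈ faceDirections) : pneg d ∈ faceDirections := by
  fin_cases hd <;> decide

theorem padd_pneg (p d : Pt) : padd (padd p d) (pneg d) = p := by
  simp only [padd, pneg]
  refine Prod.ext ?_ (Prod.ext ?_ ?_) <;> dsimp <;> ring

theorem hsfits_insert (s : Std.HashSet Pt) (L : List Pt) (p : Pt) (h : HSfits s L) :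
    HSfits (s.insert p) (L ++ [p]) := by
  intro x
  simp only [Std.HashSet.contains_insert, Bool.or_eq_true, beq_iff_eq, h x, List.mem_append,
    List.mem_singleton]
  tauto

theorem hsfits_foldl_insert :
    ∀ (P : List Pt) (s : Std.HashSet Pt) (L : List Pt), HSfits s L →
    HSfits (P.foldl (fun s x => s.insert x) s) (L ++ P) := by
  intro P
  induction P with
  | nil => intro s L h; simpa using h
  | cons p P ih =>
    intro s L h
    have h2 := ih (s.insert p) (L ++ [p]) (hsfits_insert s L p h)
    rw [← List.append_cons] at *
    exact h2

theorem inner_fold_eq (cubes : List Pt) (mnx mny mnz mxx mxy mxz : Int)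
    (V' : Std.HashSet Pt) (E : List Pt) (p : Pt)
    (hVE : ∀ d ∈ faceDirections, (V'.contains (padd p d) = true ↔ padd p d ∈ E))
    (hcube : ∀ n ∈ cubes, n ∉ E) :
    ∀ (ds : List Pt), (∀ d ∈ ds, d ∈ faceDirections) → ∀ (N : PySem.Set Pt) (c : Int),
    (ds.filterMap (fun d =>
        if mnx ≤ p.1 + d.1 ∧ p.1 + d.1 ≤ mxx ∧ mny ≤ p.2.1 + d.2.1 ∧ p.2.1 + d.2.1 ≤ mxy ∧
            mnz ≤ p.2.2 + d.2.2 ∧ p.2.2 + d.2.2 ≤ mxz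
        then some ((p.1 + d.1, p.2.1 + d.2.1, p.2.2 + d.2.2) : Pt)
        else none)).foldl (aInner cubes V') (N, c)
     = (ds.foldl (fun nxt d =>
          if bInBox mnx mny mnz mxx mxy mxz (p.1 + d.1, p.2.1 + d.2.1, p.2.2 + d.2.2)
              && !(decide (((p.1 + d.1, p.2.1 + d.2.1, p.2.2 + d.2.2) : Pt) ∈ E))
              && !(decide (((p.1 + d.1, p.2.1 + d.2.1, p.2.2 + d.2.2) : Pt) ∈ cubes))
          then PySem.Set.add nxt (p.1 + d.1, p.2.1 + d.2.1, p.2.2 + d.2.2) else nxt) N,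
        c + ((ds.filterMap (fun d =>
            if mnx ≤ p.1 + d.1 ∧ p.1 + d.1 ≤ mxx ∧ mny ≤ p.2.1 + d.2.1 ∧ p.2.1 + d.2.1 ≤ mxy ∧
                mnz ≤ p.2.2 + d.2.2 ∧ p.2.2 + d.2.2 ≤ mxz
            then some ((p.1 + d.1, p.2.1 + d.2.1, p.2.2 + d.2.2) : Pt)
            else none)).countP (fun n => cubes.contains n) : Nat)) := by
  intro ds
  induction ds with
  | nil => intro _ N c; simp
  | cons d ds ih =>
    intro hds N c
    have hdface : d ∈ faceDirections := hds d (List.mem_cons_self ..)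
    have hds' : ∀ d' ∈ ds, d' ∈ faceDirections := fun d' h => hds d' (List.mem_cons_of_mem _ h)
    simp only [List.filterMap_cons, List.foldl_cons]
    by_cases hC : (mnx ≤ p.1 + d.1 ∧ p.1 + d.1 ≤ mxx ∧ mny ≤ p.2.1 + d.2.1 ∧
        p.2.1 + d.2.1 ≤ mxy ∧ mnz ≤ p.2.2 + d.2.2 ∧ p.2.2 + d.2.2 ≤ mxz)
    · rw [if_pos hC]
      have hb : bInBox mnx mny mnz mxx mxy mxz (p.1 + d.1, p.2.1 + d.2.1, p.2.2 + d.2.2)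
          = true := by simp only [bInBox]; exact decide_eq_true hC
      have hVE' : (V'.contains ((p.1 + d.1, p.2.1 + d.2.1, p.2.2 + d.2.2) : Pt) = true
          ↔ ((p.1 + d.1, p.2.1 + d.2.1, p.2.2 + d.2.2) : Pt) ∈ E) := hVE d hdface
      simp only [List.foldl_cons, List.countP_cons, hb, Bool.true_and]
      cases hv : V'.contains ((p.1 + d.1, p.2.1 + d.2.1, p.2.2 + d.2.2) : Pt) with
      | true =>
        have hmemE : ((p.1 + d.1, p.2.1 + d.2.1, p.2.2 + d.2.2) : Pt) ∈ E := hVE'.mp hv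
        have hce : decide (((p.1 + d.1, p.2.1 + d.2.1, p.2.2 + d.2.2) : Pt) ∈ E) = true :=
          decide_eq_true hmemE
        have hnc : cubes.contains ((p.1 + d.1, p.2.1 + d.2.1, p.2.2 + d.2.2) : Pt) = false := by
          by_contra h
          exact hcube _ (by simpa using h) hmemE
        have hncm : ((p.1 + d.1, p.2.1 + d.2.1, p.2.2 + d.2.2) : Pt) ∉ cubes :=
          fun h => hcube _ h hmemE
        have hstep : aInner cubes V' (N, c) ((p.1 + d.1, p.2.1 + d.2.1, p.2.2 + d.2.2) : Pt)
            = (N, c) := by unfold aInner; rw [hv]; simp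
        rw [hstep, ih hds' N c]
        simp [hmemE, hncm]
      | false =>
        have hnE : ((p.1 + d.1, p.2.1 + d.2.1, p.2.2 + d.2.2) : Pt) ∉ E := by
          intro h
          rw [hVE'.mpr h] at hv
          cases hv
        have hce : decide (((p.1 + d.1, p.2.1 + d.2.1, p.2.2 + d.2.2) : Pt) ∈ E) = false :=
          decide_eq_false hnE
        cases hcm : cubes.contains ((p.1 + d.1, p.2.1 + d.2.1, p.2.2 + d.2.2) : Pt) with
        | true =>
          have hcmm : ((p.1 + d.1, p.2.1 + d.2.1, p.2.2 + d.2.2) : Pt) ∈ cubes := by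
            simpa using hcm
          have hcs : decide (((p.1 + d.1, p.2.1 + d.2.1, p.2.2 + d.2.2) : Pt) ∈ cubes) = true :=
            decide_eq_true hcmm
          have hstep : aInner cubes V' (N, c) ((p.1 + d.1, p.2.1 + d.2.1, p.2.2 + d.2.2) : Pt)
              = (N, c + 1) := by unfold aInner; rw [hv, hcm]; simp
          rw [hstep, ih hds' N (c + 1)]
          simp [hnE, hcmm, Prod.mk.injEq]
          ring
        | false =>
          have hncm : ((p.1 + d.1, p.2.1 + d.2.1, p.2.2 + d.2.2) : Pt) ∉ cubes := by
            simp at hcm; exact hcm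
          have hcs : decide (((p.1 + d.1, p.2.1 + d.2.1, p.2.2 + d.2.2) : Pt) ∈ cubes)
              = false := decide_eq_false hncm
          have hstep : aInner cubes V' (N, c) ((p.1 + d.1, p.2.1 + d.2.1, p.2.2 + d.2.2) : Pt)
              = (PySem.Set.add N (p.1 + d.1, p.2.1 + d.2.1, p.2.2 + d.2.2), c) := by
            unfold aInner; rw [hv, hcm]; simp
          rw [hstep, ih hds' (PySem.Set.add N (p.1 + d.1, p.2.1 + d.2.1, p.2.2 + d.2.2)) c]
          simp [hnE, hncm]
    · rw [if_neg hC]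
      have hb : bInBox mnx mny mnz mxx mxy mxz (p.1 + d.1, p.2.1 + d.2.1, p.2.2 + d.2.2)
          = false := by simp only [bInBox]; exact decide_eq_false hC
      simp only [hb, Bool.false_and, Bool.false_eq_true, if_false]
      exact ih hds' N c

theorem inner_eq (cubes : List Pt) (mnx mny mnz mxx mxy mxz : Int)
    (V' : Std.HashSet Pt) (E : List Pt) (p : Pt) (N : PySem.Set Pt) (c : Int)
    (hVE : ∀ d ∈ faceDirections, (V'.contains (padd p d) = true ↔ padd p d ∈ E))
    (hcube : ∀ n ∈ cubes, n ∉ E) :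
    (aAdjacent mnx mny mnz mxx mxy mxz p).foldl (aInner cubes V') (N, c)
      = (gCollect (bInBox mnx mny mnz mxx mxy mxz) cubes E N p,
         c + fCount cubes (aAdjacent mnx mny mnz mxx mxy mxz) p) := by
  exact inner_fold_eq cubes mnx mny mnz mxx mxy mxz V' E p hVE hcube faceDirections
    (fun d hd => hd) N c

theorem layer_fold (cubes : List Pt) (mnx mny mnz mxx mxy mxz : Int) (E : List Pt) (b : Bool) :
    ∀ (P : List Pt), ∀ (V' : Std.HashSet Pt) (VL N : List Pt) (c : Int),
    HSfits V' VL →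
    (∀ p ∈ P, ppar p = b) → (∀ p ∈ P, p ∈ E) → (∀ q ∈ VL, q ∈ E) →
    (∀ q ∈ E, ppar q ≠ b → q ∈ VL) → (∀ n ∈ cubes, n ∉ E) → P.Nodup → (∀ p ∈ P, p ∉ VL) →
    P.foldl (aStep cubes (aAdjacent mnx mny mnz mxx mxy mxz)) (V', N, c)
      = (P.foldl (fun s x => s.insert x) V',
         P.foldl (gCollect (bInBox mnx mny mnz mxx mxy mxz) cubes E) N,
         c + (P.map (fCount cubes (aAdjacent mnx mny mnz mxx mxy mxz))).sum) := by
  intro P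
  induction P with
  | nil =>
    intro V' VL N c _ _ _ _ _ _ _ _
    simp
  | cons p P ih =>
    intro V' VL N c hfit hpar hPE hVE hEV hcube hnd hPV
    have hpmem : p ∈ (p :: P) := List.mem_cons_self ..
    have hpV : p ∉ VL := hPV p hpmem
    have hb : ppar p = b := hpar p hpmem
    have hfit' : HSfits (V'.insert p) (VL ++ [p]) := hsfits_insert V' VL p hfit
    have hVE2 : ∀ d ∈ faceDirections,
        ((V'.insert p).contains (padd p d) = true ↔ padd p d ∈ E) := by
      intro d hd
      have hp2 := ppar_padd p d hd
      rw [hfit' (padd p d)]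
      constructor
      · intro h
        rcases List.mem_append.mp h with h | h
        · exact hVE _ h
        · exfalso
          have heq : padd p d = p := by simpa using h
          rw [heq, hb] at hp2
          simp at hp2
      · intro h
        have hq : ppar (padd p d) ≠ b := by rw [hp2, hb]; simp
        exact List.mem_append_left _ (hEV _ h hq)
    have hr := inner_eq cubes mnx mny mnz mxx mxy mxz (V'.insert p) E p N c hVE2 hcube
    have hstep : aStep cubes (aAdjacent mnx mny mnz mxx mxy mxz) (V', N, c) p
        = (V'.insert p,
           gCollect (bInBox mnx mny mnz mxx mxy mxz) cubes E N p,
           c + fCount cubes (aAdjacent mnx mny mnz mxx mxy mxz) p) := by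
      unfold aStep
      dsimp only
      rw [hr]
    have hVE3 : ∀ q ∈ VL ++ [p], q ∈ E := by
      intro q hq
      rcases List.mem_append.mp hq with h | h
      · exact hVE _ h
      · have : q = p := by simpa using h
        rw [this]; exact hPE p hpmem
    have hEV3 : ∀ q ∈ E, ppar q ≠ b → q ∈ VL ++ [p] :=
      fun q hq hne => List.mem_append_left _ (hEV q hq hne)
    have hPV3 : ∀ q ∈ P, q ∉ VL ++ [p] := by
      intro q hq hmem
      rcases List.mem_append.mp hmem with h | h
      · exact hPV q (List.mem_cons_of_mem _ hq) h
      · have : q = p := by simpa using h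
        subst this
        exact (List.nodup_cons.mp hnd).1 hq
    rw [List.foldl_cons, hstep, ih (V'.insert p) (VL ++ [p]) _ _ hfit'
      (fun q hq => hpar q (List.mem_cons_of_mem _ hq))
      (fun q hq => hPE q (List.mem_cons_of_mem _ hq))
      hVE3 hEV3 hcube (List.nodup_cons.mp hnd).2 hPV3]
    simp [add_assoc]

theorem foldl_add_if_nodup (g : Pt → Pt) (q : Pt → Bool) :
    ∀ (ds : List Pt) (nxt : List Pt), nxt.Nodup →
    (ds.foldl (fun nxt d => if q d then PySem.Set.add nxt (g d) else nxt) nxt).Nodup := by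
  intro ds
  induction ds with
  | nil => intro nxt h; exact h
  | cons d ds ih =>
    intro nxt h
    simp only [List.foldl_cons]
    by_cases hq : q d
    · simp only [hq, if_true]; exact ih _ (PySem.Set.nodup_add _ _ h)
    · simp only [hq]; exact ih _ h

theorem mem_foldl_add_if (g : Pt → Pt) (q : Pt → Bool) :
    ∀ (ds : List Pt) (nxt : List Pt) (x : Pt),
    x ∈ ds.foldl (fun nxt d => if q d then PySem.Set.add nxt (g d) else nxt) nxt ↔
    x ∈ nxt ∨ ∃ d ∈ ds, q d = true ∧ x = g d := by
  intro ds
  induction ds with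
  | nil => intro nxt x; simp
  | cons d ds ih =>
    intro nxt x
    simp only [List.foldl_cons]
    by_cases hq : q d
    · simp only [hq, if_true]
      rw [ih]
      rw [PySem.Set.mem_add]
      constructor
      · rintro (⟨h | h⟩ | ⟨d', hd', hq', hx⟩)
        · exact Or.inl h
        · exact Or.inr ⟨d, List.mem_cons_self .., hq, h⟩
        · exact Or.inr ⟨d', List.mem_cons_of_mem _ hd', hq', hx⟩
      · rintro (h | ⟨d', hd', hq', hx⟩)
        · exact Or.inl (Or.inl h)
        · rcases List.mem_cons.mp hd' with h | h
          · subst h; exact Or.inl (Or.inr hx)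
          · exact Or.inr ⟨d', h, hq', hx⟩
    · simp only [hq]
      rw [ih]
      constructor
      · rintro (h | ⟨d', hd', hq', hx⟩)
        · exact Or.inl h
        · exact Or.inr ⟨d', List.mem_cons_of_mem _ hd', hq', hx⟩
      · rintro (h | ⟨d', hd', hq', hx⟩)
        · exact Or.inl h
        · rcases List.mem_cons.mp hd' with h | h
          · subst h; rw [hq'] at hq; cases hq rfl
          · exact Or.inr ⟨d', h, hq', hx⟩

theorem mem_gCollect (mnx mny mnz mxx mxy mxz : Int) (cubes E : List Pt)
    (nxt : PySem.Set Pt) (p : Pt) (x : Pt) :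
    x ∈ gCollect (bInBox mnx mny mnz mxx mxy mxz) cubes E nxt p ↔
    x ∈ nxt ∨ ∃ d ∈ faceDirections, x = padd p d ∧
      bInBox mnx mny mnz mxx mxy mxz x = true ∧ x ∉ E ∧ x ∉ cubes := by
  unfold gCollect
  refine Iff.trans (mem_foldl_add_if (fun d => padd p d)
    (fun d => bInBox mnx mny mnz mxx mxy mxz (padd p d)
      && !(decide (padd p d ∈ E)) && !(decide (padd p d ∈ cubes))) faceDirections nxt x) ?_
  constructor
  · rintro (h | ⟨d, hd, hq, hx⟩)
    · exact Or.inl h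
    · simp only [Bool.and_eq_true, Bool.not_eq_true'] at hq
      subst hx
      exact Or.inr ⟨d, hd, rfl, hq.1.1, of_decide_eq_false hq.1.2, of_decide_eq_false hq.2⟩
  · rintro (h | ⟨d, hd, hx, hb, hE, hc⟩)
    · exact Or.inl h
    · subst hx
      refine Or.inr ⟨d, hd, ?_, rfl⟩
      simp [hb, hE, hc]

theorem nodup_gCollect (mnx mny mnz mxx mxy mxz : Int) (cubes E : List Pt)
    (nxt : PySem.Set Pt) (p : Pt) (h : nxt.Nodup) :
    (gCollect (bInBox mnx mny mnz mxx mxy mxz) cubes E nxt p).Nodup :=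
  foldl_add_if_nodup (fun d => padd p d)
    (fun d => bInBox mnx mny mnz mxx mxy mxz (padd p d)
      && !(decide (padd p d ∈ E)) && !(decide (padd p d ∈ cubes)))
    faceDirections nxt h

theorem nodup_layer_next (mnx mny mnz mxx mxy mxz : Int) (cubes E : List Pt) :
    ∀ (P : List Pt) (N : PySem.Set Pt), N.Nodup →
    (P.foldl (gCollect (bInBox mnx mny mnz mxx mxy mxz) cubes E) N).Nodup := by
  intro P
  induction P with
  | nil => intro N h; exact h
  | cons p P ih =>
    intro N h
    simp only [List.foldl_cons]
    exact ih _ (nodup_gCollect _ _ _ _ _ _ _ _ _ _ h)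

theorem mem_layer_next (mnx mny mnz mxx mxy mxz : Int) (cubes E : List Pt) :
    ∀ (P : List Pt) (N : PySem.Set Pt) (x : Pt),
    x ∈ P.foldl (gCollect (bInBox mnx mny mnz mxx mxy mxz) cubes E) N ↔
    x ∈ N ∨ ∃ p ∈ P, ∃ d ∈ faceDirections, x = padd p d ∧
      bInBox mnx mny mnz mxx mxy mxz x = true ∧ x ∉ E ∧ x ∉ cubes := by
  intro P
  induction P with
  | nil => intro N x; simp
  | cons p P ih =>
    intro N x
    simp only [List.foldl_cons]
    rw [ih, mem_gCollect]
    constructor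
    · rintro (⟨h | ⟨d, hd, rest⟩⟩ | ⟨p', hp', rest⟩)
      · exact Or.inl h
      · exact Or.inr ⟨p, List.mem_cons_self .., d, hd, rest⟩
      · exact Or.inr ⟨p', List.mem_cons_of_mem _ hp', rest⟩
    · rintro (h | ⟨p', hp', rest⟩)
      · exact Or.inl (Or.inl h)
      · rcases List.mem_cons.mp hp' with h | h
        · subst h; exact Or.inl (Or.inr rest)
        · exact Or.inr ⟨p', h, rest⟩

theorem sumF_append (cubes : List Pt) (adj : Pt → List Pt) (V W : List Pt) :
    sumF cubes adj (V ++ W) = sumF cubes adj V + sumF cubes adj W := by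
  simp [sumF]

theorem loop_main (cubes : List Pt) (mnx mny mnz mxx mxy mxz : Int) :
    ∀ (fuel : Nat) (P : List Pt) (hs : Std.HashSet Pt) (VL : List Pt) (c : Int) (b : Bool),
    HSfits hs VL →
    (∀ p ∈ P, ppar p = b) → P.Nodup → VL.Nodup → (∀ p ∈ P, p ∉ VL) →
    (∀ p ∈ P, p ∉ cubes) → (∀ q ∈ VL, q ∉ cubes) →
    aLoop cubes (aAdjacent mnx mny mnz mxx mxy mxz) fuel P hs c
      = c + sumF cubes (aAdjacent mnx mny mnz mxx mxy mxz)
          (gFlood (bInBox mnx mny mnz mxx mxy mxz) cubes fuel P VL)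
        - sumF cubes (aAdjacent mnx mny mnz mxx mxy mxz) VL
    ∧ (gFlood (bInBox mnx mny mnz mxx mxy mxz) cubes fuel P VL).Nodup := by
  intro fuel
  induction fuel with
  | zero =>
    intro P hs VL c b _ hpar hPnd hVnd hPV hPc hVc
    simp only [aLoop, gFlood]
    exact ⟨by ring, hVnd⟩
  | succ fuel ih =>
    intro P hs VL c b hfit hpar hPnd hVnd hPV hPc hVc
    by_cases hP : P = []
    · subst hP
      have ha : aLoop cubes (aAdjacent mnx mny mnz mxx mxy mxz) (fuel+1) [] hs c = c := by
        simp [aLoop]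
      have hb2 : gFlood (bInBox mnx mny mnz mxx mxy mxz) cubes (fuel+1) [] VL = VL := by
        simp [gFlood]
      rw [ha, hb2]
      exact ⟨by ring, hVnd⟩
    · simp only [aLoop, gFlood, if_neg hP]
      have hEV : ∀ q ∈ VL ++ P, ppar q ≠ b → q ∈ VL := by
        intro q hq hne
        rcases List.mem_append.mp hq with h | h
        · exact h
        · exact absurd (hpar q h) hne
      have hcubeE : ∀ n ∈ cubes, n ∉ VL ++ P := by
        intro n hn hmem
        rcases List.mem_append.mp hmem with h | h
        · exact hVc n h hn
        · exact hPc n h hn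
      have hlayer := layer_fold cubes mnx mny mnz mxx mxy mxz (VL ++ P) b P hs VL
        PySem.Set.empty c hfit hpar (fun p hp => List.mem_append_right _ hp)
        (fun q hq => List.mem_append_left _ hq) hEV hcubeE hPnd hPV
      have hmemN : ∀ x ∈ P.foldl (gCollect (bInBox mnx mny mnz mxx mxy mxz) cubes (VL ++ P))
          PySem.Set.empty,
          ∃ p ∈ P, ∃ d ∈ faceDirections, x = padd p d ∧
            bInBox mnx mny mnz mxx mxy mxz x = true ∧ x ∉ VL ++ P ∧ x ∉ cubes := by
        intro x hx
        rcases (mem_layer_next mnx mny mnz mxx mxy mxz cubes (VL ++ P) P PySem.Set.empty x).mp hx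
          with h | h
        · cases h
        · exact h
      have hVPnd : (VL ++ P).Nodup :=
        List.Nodup.append hVnd hPnd (fun a ha hb => hPV a hb ha)
      have hih := ih (P.foldl (gCollect (bInBox mnx mny mnz mxx mxy mxz) cubes (VL ++ P))
          PySem.Set.empty) (P.foldl (fun s x => s.insert x) hs) (VL ++ P)
        (c + (P.map (fCount cubes (aAdjacent mnx mny mnz mxx mxy mxz))).sum) (!b)
        (hsfits_foldl_insert P hs VL hfit)
        (by
          intro x hx
          obtain ⟨p, hp, d, hd, hxe, _, _, _⟩ := hmemN x hx
          rw [hxe, ppar_padd p d hd, hpar p hp])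
        (nodup_layer_next mnx mny mnz mxx mxy mxz _ _ P PySem.Set.empty List.nodup_nil)
        hVPnd
        (by
          intro x hx
          obtain ⟨p, hp, d, hd, hxe, _, hnm, _⟩ := hmemN x hx
          exact hnm)
        (by
          intro x hx
          obtain ⟨p, hp, d, hd, hxe, _, _, hnc⟩ := hmemN x hx
          exact hnc)
        (fun q hq hqc => hcubeE q hqc hq)
      rw [hlayer]
      refine ⟨?_, hih.2⟩
      rw [hih.1, sumF_append]
      have : (P.map (fCount cubes (aAdjacent mnx mny mnz mxx mxy mxz))).sum
          = sumF cubes (aAdjacent mnx mny mnz mxx mxy mxz) P := rfl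
      rw [this]
      ring

-- reachability from the start cell through in-box non-cube cells; both final sets equal it
inductive Reach (inBox : Pt → Bool) (cubes : List Pt) (s : Pt) : Pt → Prop
  | base : Reach inBox cubes s s
  | step {p d : Pt} : Reach inBox cubes s p → d ∈ faceDirections →
      inBox (padd p d) = true → padd p d ∉ cubes → Reach inBox cubes s (padd p d)

def Closed (inBox : Pt → Bool) (cubes L : List Pt) : Prop :=
  ∀ p ∈ L, ∀ d ∈ faceDirections, inBox (padd p d) = true → padd p d ∉ cubes → padd p d ∈ L

theorem reach_subset (inBox : Pt → Bool) (cubes : List Pt) (s : Pt) (L : List Pt)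
    (hs : s ∈ L) (hcl : Closed inBox cubes L) :
    ∀ x : Pt, Reach inBox cubes s x → x ∈ L := by
  intro x hx
  induction hx with
  | base => exact hs
  | step h hd hb hc ih => exact hcl _ ih _ hd hb hc

theorem mem_boxFinset (mnx mny mnz mxx mxy mxz : Int) (x : Pt) :
    x ∈ ((Finset.Icc mnx mxx) ×ˢ ((Finset.Icc mny mxy) ×ˢ (Finset.Icc mnz mxz))) ↔ bInBox mnx mny mnz mxx mxy mxz x = true := by
  simp only [Finset.mem_product, Finset.mem_Icc, bInBox, decide_eq_true_eq]
  tauto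

theorem length_le_boxCard (mnx mny mnz mxx mxy mxz : Int) (L : List Pt) (hnd : L.Nodup)
    (hbox : ∀ x ∈ L, bInBox mnx mny mnz mxx mxy mxz x = true) :
    L.length ≤ ((Finset.Icc mnx mxx) ×ˢ ((Finset.Icc mny mxy) ×ˢ (Finset.Icc mnz mxz))).card := by
  calc L.length = L.toFinset.card := (List.toFinset_card_of_nodup hnd).symm
    _ ≤ _ := Finset.card_le_card (fun x hx =>
        (mem_boxFinset mnx mny mnz mxx mxy mxz x).mpr (hbox x (List.mem_toFinset.mp hx)))

theorem boxCard_le (mnx mny mnz mxx mxy mxz : Int) (h1 : mnx ≤ mxx) (h2 : mny ≤ mxy)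
    (h3 : mnz ≤ mxz) :
    ((Finset.Icc mnx mxx) ×ˢ ((Finset.Icc mny mxy) ×ˢ (Finset.Icc mnz mxz))).card
      ≤ ((mxx - mnx + 1) * (mxy - mny + 1) * (mxz - mnz + 1)).toNat := by
  have hcard : ((Finset.Icc mnx mxx) ×ˢ ((Finset.Icc mny mxy) ×ˢ (Finset.Icc mnz mxz))).card
      = (mxx + 1 - mnx).toNat * ((mxy + 1 - mny).toNat * (mxz + 1 - mnz).toNat) := by
    simp [Int.card_Icc]
  rw [hcard]
  have ha : (0:Int) ≤ mxx + 1 - mnx := by omega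
  have hb : (0:Int) ≤ mxy + 1 - mny := by omega
  have hc : (0:Int) ≤ mxz + 1 - mnz := by omega
  have habc : ((mxx - mnx + 1) * (mxy - mny + 1) * (mxz - mnz + 1))
      = (mxx + 1 - mnx) * ((mxy + 1 - mny) * (mxz + 1 - mnz)) := by ring
  rw [habc]
  obtain ⟨a', ha'⟩ : ∃ n : Nat, mxx + 1 - mnx = (n : Int) := ⟨_, (Int.toNat_of_nonneg ha).symm⟩
  obtain ⟨b', hb'⟩ : ∃ n : Nat, mxy + 1 - mny = (n : Int) := ⟨_, (Int.toNat_of_nonneg hb).symm⟩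
  obtain ⟨c', hc'⟩ : ∃ n : Nat, mxz + 1 - mnz = (n : Int) := ⟨_, (Int.toNat_of_nonneg hc).symm⟩
  rw [ha', hb', hc']
  simp only [Int.toNat_natCast]
  rw [show ((a' : Int) * ((b' : Int) * (c' : Int))) = ((a' * (b' * c') : Nat) : Int) by
    push_cast; ring]
  rw [Int.toNat_natCast]

-- unfolding equations for A's ghost flood
theorem gFlood_nil_any (inBox : Pt → Bool) (cubes : List Pt) (E : List Pt) :
    ∀ fuel : Nat, gFlood inBox cubes fuel [] E = E := by
  intro fuel
  cases fuel <;> simp [gFlood]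

theorem gFlood_succ_cons (inBox : Pt → Bool) (cubes : List Pt) (fuel : Nat) (P E : List Pt)
    (hP : P ≠ []) :
    gFlood inBox cubes (fuel + 1) P E
      = gFlood inBox cubes fuel (P.foldl (gCollect inBox cubes (E ++ P)) PySem.Set.empty)
        (E ++ P) := by
  simp [gFlood, hP]

-- A-side soundness: every cell the flood ever records is reachable
theorem flood_sound (mnx mny mnz mxx mxy mxz : Int) (cubes : List Pt) (s : Pt) :
    ∀ (fuel : Nat) (P E : List Pt),
    (∀ x ∈ E, Reach (bInBox mnx mny mnz mxx mxy mxz) cubes s x) →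
    (∀ x ∈ P, Reach (bInBox mnx mny mnz mxx mxy mxz) cubes s x) →
    ∀ x ∈ gFlood (bInBox mnx mny mnz mxx mxy mxz) cubes fuel P E,
      Reach (bInBox mnx mny mnz mxx mxy mxz) cubes s x := by
  intro fuel
  induction fuel with
  | zero => intro P E hE hP x hx; exact hE x hx
  | succ fuel ih =>
    intro P E hE hP x hx
    by_cases hPe : P = []
    · subst hPe
      rw [gFlood_nil_any] at hx
      exact hE x hx
    · rw [gFlood_succ_cons _ _ _ _ _ hPe] at hx
      refine ih _ _ ?_ ?_ x hx
      · intro y hy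
        rcases List.mem_append.mp hy with h | h
        · exact hE y h
        · exact hP y h
      · intro y hy
        rcases (mem_layer_next mnx mny mnz mxx mxy mxz cubes (E ++ P) P
            PySem.Set.empty y).mp hy with h | ⟨p, hp, d, hd, hye, hb, _, hc⟩
        · cases h
        · subst hye
          exact Reach.step (hP p hp) hd hb hc

-- the closure invariant is preserved from one layer to the next
theorem inv_step (mnx mny mnz mxx mxy mxz : Int) (cubes P E : List Pt)
    (hInv : InvEP (bInBox mnx mny mnz mxx mxy mxz) cubes E P) :
    InvEP (bInBox mnx mny mnz mxx mxy mxz) cubes (E ++ P)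
      (P.foldl (gCollect (bInBox mnx mny mnz mxx mxy mxz) cubes (E ++ P)) PySem.Set.empty) := by
  intro y hb hc ⟨d, hd, hmem⟩
  by_cases hy : y ∈ E ++ P
  · exact Or.inl hy
  · rcases List.mem_append.mp hmem with hE | hP
    · rcases hInv y hb hc ⟨d, hd, hE⟩ with h | h
      · exact absurd (List.mem_append_left _ h) hy
      · exact absurd (List.mem_append_right _ h) hy
    · refine Or.inr ((mem_layer_next mnx mny mnz mxx mxy mxz cubes (E ++ P) P
        PySem.Set.empty y).mpr (Or.inr ⟨padd y d, hP, pneg d, pneg_mem d hd,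
        (padd_pneg y d).symm, hb, hy, hc⟩))

-- A-side termination + closedness: with fuel at least (box volume + 1) the pending layers are
-- exhausted and the final visited list is closed under in-box air adjacency
theorem flood_term (mnx mny mnz mxx mxy mxz : Int) (cubes : List Pt) :
    ∀ (fuel : Nat) (P E : List Pt),
    (E ++ P).Nodup → (∀ x ∈ E ++ P, bInBox mnx mny mnz mxx mxy mxz x = true) →
    InvEP (bInBox mnx mny mnz mxx mxy mxz) cubes E P →
    ((Finset.Icc mnx mxx) ×ˢ ((Finset.Icc mny mxy) ×ˢ (Finset.Icc mnz mxz))).card + 1 ≤ fuel + E.length →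
    (∀ x ∈ E ++ P, x ∈ gFlood (bInBox mnx mny mnz mxx mxy mxz) cubes fuel P E)
    ∧ Closed (bInBox mnx mny mnz mxx mxy mxz) cubes
        (gFlood (bInBox mnx mny mnz mxx mxy mxz) cubes fuel P E) := by
  intro fuel
  induction fuel with
  | zero =>
    intro P E hnd hbox hInv hfuel
    exfalso
    have h1 := length_le_boxCard mnx mny mnz mxx mxy mxz (E ++ P) hnd hbox
    rw [List.length_append] at h1
    omega
  | succ fuel ih =>
    intro P E hnd hbox hInv hfuel
    by_cases hPe : P = []
    · subst hPe
      rw [gFlood_nil_any]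
      refine ⟨by simp, ?_⟩
      intro p hp d hd hb hc
      rcases hInv (padd p d) hb hc ⟨pneg d, pneg_mem d hd, by rw [padd_pneg]; exact hp⟩
        with h | h
      · exact h
      · cases h
    · rw [gFlood_succ_cons _ _ _ _ _ hPe]
      set P' := P.foldl (gCollect (bInBox mnx mny mnz mxx mxy mxz) cubes (E ++ P))
        PySem.Set.empty with hP'
      have hmemP' : ∀ x ∈ P', ∃ p ∈ P, ∃ d ∈ faceDirections, x = padd p d ∧
          bInBox mnx mny mnz mxx mxy mxz x = true ∧ x ∉ E ++ P ∧ x ∉ cubes := by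
        intro x hx
        rcases (mem_layer_next mnx mny mnz mxx mxy mxz cubes (E ++ P) P
            PySem.Set.empty x).mp hx with h | h
        · cases h
        · exact h
      have hnd' : ((E ++ P) ++ P').Nodup := by
        refine List.Nodup.append hnd
          (nodup_layer_next mnx mny mnz mxx mxy mxz _ _ P PySem.Set.empty List.nodup_nil) ?_
        intro a ha hb2
        obtain ⟨_, _, _, _, _, _, hnm, _⟩ := hmemP' a hb2
        exact hnm ha
      have hbox' : ∀ x ∈ (E ++ P) ++ P', bInBox mnx mny mnz mxx mxy mxz x = true := by
        intro x hx
        rcases List.mem_append.mp hx with h | h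
        · exact hbox x h
        · obtain ⟨_, _, _, _, _, hb2, _, _⟩ := hmemP' x h
          exact hb2
      have hInv' := inv_step mnx mny mnz mxx mxy mxz cubes P E hInv
      have hlen : 1 ≤ P.length := by
        cases P with
        | nil => exact absurd rfl hPe
        | cons a l => simp
      have hfuel' : ((Finset.Icc mnx mxx) ×ˢ ((Finset.Icc mny mxy) ×ˢ (Finset.Icc mnz mxz))).card + 1 ≤ fuel + (E ++ P).length := by
        rw [List.length_append]
        omega
      obtain ⟨hsub, hcl⟩ := ih P' (E ++ P) hnd' hbox' hInv' hfuel'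
      exact ⟨fun x hx => hsub x (List.mem_append_left _ hx), hcl⟩

-- B-side: everything the fold over the six directions does in one DFS visit
theorem gpush_fold (mnx mny mnz mxx mxy mxz : Int) (cubes : List Pt) (c : Pt) :
    ∀ (ds : List Pt) (L S : List Pt),
    (∀ x ∈ L, x ∈ (ds.foldl (gPush mnx mny mnz mxx mxy mxz cubes c) (L, S)).1) ∧
    (∀ x ∈ (ds.foldl (gPush mnx mny mnz mxx mxy mxz cubes c) (L, S)).1,
      x ∈ L ∨ ∃ d ∈ ds, x = padd c d ∧ bInBox mnx mny mnz mxx mxy mxz x = true ∧ x ∉ cubes) ∧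
    (∀ x ∈ S, x ∈ (ds.foldl (gPush mnx mny mnz mxx mxy mxz cubes c) (L, S)).2) ∧
    (∀ x ∈ (ds.foldl (gPush mnx mny mnz mxx mxy mxz cubes c) (L, S)).2,
      x ∈ S ∨ x ∈ (ds.foldl (gPush mnx mny mnz mxx mxy mxz cubes c) (L, S)).1) ∧
    (L.Nodup → (ds.foldl (gPush mnx mny mnz mxx mxy mxz cubes c) (L, S)).1.Nodup) ∧
    ((ds.foldl (gPush mnx mny mnz mxx mxy mxz cubes c) (L, S)).2.length + L.length
      = S.length + (ds.foldl (gPush mnx mny mnz mxx mxy mxz cubes c) (L, S)).1.length) ∧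
    (∀ d ∈ ds, bInBox mnx mny mnz mxx mxy mxz (padd c d) = true → padd c d ∉ cubes →
      padd c d ∈ (ds.foldl (gPush mnx mny mnz mxx mxy mxz cubes c) (L, S)).1) ∧
    (∀ x ∈ (ds.foldl (gPush mnx mny mnz mxx mxy mxz cubes c) (L, S)).1,
      x ∈ L ∨ x ∈ (ds.foldl (gPush mnx mny mnz mxx mxy mxz cubes c) (L, S)).2) := by
  intro ds
  induction ds with
  | nil =>
    intro L S
    refine ⟨fun x hx => hx, fun x hx => Or.inl hx, fun x hx => hx,
      fun x hx => Or.inl hx, fun h => h, rfl, ?_, fun x hx => Or.inl hx⟩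
    intro d hd
    cases hd
  | cons d ds ih =>
    intro L S
    simp only [List.foldl_cons]
    by_cases hcond : (bInBox mnx mny mnz mxx mxy mxz (padd c d)
        && !(decide (padd c d ∈ L)) && !(decide (padd c d ∈ cubes))) = true
    · have hstep : gPush mnx mny mnz mxx mxy mxz cubes c (L, S) d
          = (L ++ [padd c d], padd c d :: S) := by
        unfold gPush
        rw [if_pos hcond]
      simp only [Bool.and_eq_true, Bool.not_eq_true', decide_eq_false_iff_not] at hcond
      obtain ⟨⟨hbB, hnL⟩, hnC⟩ := hcond
      rw [hstep]
      obtain ⟨i1, i2, i3, i4, i5, i6, i7, i8⟩ := ih (L ++ [padd c d]) (padd c d :: S)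
      refine ⟨?_, ?_, ?_, ?_, ?_, ?_, ?_, ?_⟩
      · intro x hx
        exact i1 x (List.mem_append_left _ hx)
      · intro x hx
        rcases i2 x hx with h | ⟨d', hd', h⟩
        · rcases List.mem_append.mp h with h | h
          · exact Or.inl h
          · have hxe : x = padd c d := by simpa using h
            subst hxe
            exact Or.inr ⟨d, List.mem_cons_self .., rfl, hbB, hnC⟩
        · exact Or.inr ⟨d', List.mem_cons_of_mem _ hd', h⟩
      · intro x hx
        exact i3 x (List.mem_cons_of_mem _ hx)
      · intro x hx
        rcases i4 x hx with h | h
        · rcases List.mem_cons.mp h with h | h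
          · subst h
            exact Or.inr (i1 _ (List.mem_append_right _ (List.mem_singleton.mpr rfl)))
          · exact Or.inl h
        · exact Or.inr h
      · intro hnd
        exact i5 (by
          refine List.Nodup.append hnd (List.nodup_singleton _) ?_
          intro a ha hb2
          have : a = padd c d := by simpa using hb2
          rw [this] at ha
          exact hnL ha)
      · have h6 := i6
        simp only [List.length_append, List.length_cons, List.length_nil] at h6
        omega
      · intro d' hd' hb' hc'
        rcases List.mem_cons.mp hd' with h | h
        · rw [h]
          exact i1 _ (List.mem_append_right _ (List.mem_singleton.mpr rfl))
        · exact i7 d' h hb' hc'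
      · intro x hx
        rcases i8 x hx with h | h
        · rcases List.mem_append.mp h with h | h
          · exact Or.inl h
          · have : x = padd c d := by simpa using h
            subst this
            exact Or.inr (i3 _ (List.mem_cons_self ..))
        · exact Or.inr h
    · have hstep : gPush mnx mny mnz mxx mxy mxz cubes c (L, S) d = (L, S) := by
        unfold gPush
        rw [if_neg (by simpa using hcond)]
      rw [hstep]
      obtain ⟨i1, i2, i3, i4, i5, i6, i7, i8⟩ := ih L S
      refine ⟨i1, ?_, i3, i4, i5, i6, ?_, i8⟩
      · intro x hx
        rcases i2 x hx with h | ⟨d', hd', h⟩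
        · exact Or.inl h
        · exact Or.inr ⟨d', List.mem_cons_of_mem _ hd', h⟩
      · intro d' hd' hb' hc'
        rcases List.mem_cons.mp hd' with h | h
        · rw [h] at hb' hc' ⊢
          simp only [Bool.and_eq_true, Bool.not_eq_true', decide_eq_false_iff_not] at hcond
          have hmem : padd c d ∈ L := by
            by_contra hnm
            exact hcond ⟨⟨hb', hnm⟩, hc'⟩
          exact i1 _ hmem
        · exact i7 d' h hb' hc'

-- B-side main invariant run: the DFS exhausts its stack within (volume + 2) iterations and its
-- seen-list is sound and closed
theorem dfs_main (mnx mny mnz mxx mxy mxz : Int) (cubes : List Pt) (s : Pt) :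
    ∀ (fuel : Nat) (L S : List Pt),
    L.Nodup → (∀ x ∈ L, bInBox mnx mny mnz mxx mxy mxz x = true) →
    (∀ x ∈ S, x ∈ L) →
    (∀ p ∈ L, ∀ d ∈ faceDirections, bInBox mnx mny mnz mxx mxy mxz (padd p d) = true →
      padd p d ∉ cubes → padd p d ∈ L ∨ p ∈ S) →
    (∀ x ∈ L, Reach (bInBox mnx mny mnz mxx mxy mxz) cubes s x) →
    S.length + ((Finset.Icc mnx mxx) ×ˢ ((Finset.Icc mny mxy) ×ˢ (Finset.Icc mnz mxz))).card + 1 ≤ fuel + L.length →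
    (∀ x ∈ L, x ∈ gDfs mnx mny mnz mxx mxy mxz cubes fuel (L, S))
    ∧ Closed (bInBox mnx mny mnz mxx mxy mxz) cubes
        (gDfs mnx mny mnz mxx mxy mxz cubes fuel (L, S))
    ∧ (∀ x ∈ gDfs mnx mny mnz mxx mxy mxz cubes fuel (L, S),
        Reach (bInBox mnx mny mnz mxx mxy mxz) cubes s x) := by
  intro fuel
  induction fuel with
  | zero =>
    intro L S hnd hbox hSL hInv hsound hfuel
    exfalso
    have h1 := length_le_boxCard mnx mny mnz mxx mxy mxz L hnd hbox
    omega
  | succ fuel ih =>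
    intro L S hnd hbox hSL hInv hsound hfuel
    cases S with
    | nil =>
      have hres : gDfs mnx mny mnz mxx mxy mxz cubes (fuel + 1) (L, []) = L := rfl
      rw [hres]
      refine ⟨fun x hx => hx, ?_, hsound⟩
      intro p hp d hd hb hc
      rcases hInv p hp d hd hb hc with h | h
      · exact h
      · cases h
    | cons c rest =>
      have hres : gDfs mnx mny mnz mxx mxy mxz cubes (fuel + 1) (L, c :: rest)
          = gDfs mnx mny mnz mxx mxy mxz cubes fuel
            (faceDirections.foldl (gPush mnx mny mnz mxx mxy mxz cubes c) (L, rest)) := rfl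
      rw [hres]
      obtain ⟨i1, i2, i3, i4, i5, i6, i7, i8⟩ :=
        gpush_fold mnx mny mnz mxx mxy mxz cubes c faceDirections L rest
      set F := faceDirections.foldl (gPush mnx mny mnz mxx mxy mxz cubes c) (L, rest) with hF
      have hcL : c ∈ L := hSL c (List.mem_cons_self ..)
      have hbox' : ∀ x ∈ F.1, bInBox mnx mny mnz mxx mxy mxz x = true := by
        intro x hx
        rcases i2 x hx with h | ⟨_, _, _, hb2, _⟩
        · exact hbox x h
        · exact hb2
      have hSL' : ∀ x ∈ F.2, x ∈ F.1 := by
        intro x hx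
        rcases i4 x hx with h | h
        · exact i1 x (hSL x (List.mem_cons_of_mem _ h))
        · exact h
      have hInv' : ∀ p ∈ F.1, ∀ d ∈ faceDirections,
          bInBox mnx mny mnz mxx mxy mxz (padd p d) = true → padd p d ∉ cubes →
          padd p d ∈ F.1 ∨ p ∈ F.2 := by
        intro p hp d hd hb hc
        rcases i8 p hp with hpL | hpS
        · by_cases hpc : p = c
          · subst hpc
            exact Or.inl (i7 d hd hb hc)
          · rcases hInv p hpL d hd hb hc with h | h
            · exact Or.inl (i1 _ h)
            · rcases List.mem_cons.mp h with h | h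
              · exact absurd h hpc
              · exact Or.inr (i3 p h)
        · exact Or.inr hpS
      have hsound' : ∀ x ∈ F.1, Reach (bInBox mnx mny mnz mxx mxy mxz) cubes s x := by
        intro x hx
        rcases i2 x hx with h | ⟨d, hd, hxe, hb2, hc2⟩
        · exact hsound x h
        · subst hxe
          exact Reach.step (hsound c hcL) hd hb2 hc2
      have hfuel' : F.2.length + ((Finset.Icc mnx mxx) ×ˢ ((Finset.Icc mny mxy) ×ˢ (Finset.Icc mnz mxz))).card + 1
          ≤ fuel + F.1.length := by
        have h6 := i6
        simp only [List.length_cons] at hfuel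
        omega
      obtain ⟨j1, j2, j3⟩ := ih F.1 F.2 (i5 hnd) hbox' hSL' hInv' hsound' hfuel'
      have hgoal : ∀ x ∈ L, x ∈ gDfs mnx mny mnz mxx mxy mxz cubes fuel F := by
        intro x hx
        exact j1 x (i1 x hx)
      exact ⟨hgoal, by
        have hFe : (F.1, F.2) = F := rfl
        rw [hFe] at j2
        exact j2, by
        have hFe : (F.1, F.2) = F := rfl
        rw [hFe] at j3
        exact j3⟩

-- transfer from the port's hash-set DFS to the ghost list DFS
theorem push_fold_fits (mnx mny mnz mxx mxy mxz : Int) (cubes : List Pt) (c : Pt) :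
    ∀ (ds : List Pt) (hs : Std.HashSet Pt) (L S : List Pt), HSfits hs L →
    HSfits (ds.foldl (bPush mnx mny mnz mxx mxy mxz (PySem.Set.ofList cubes) c) (hs, S)).1
      (ds.foldl (gPush mnx mny mnz mxx mxy mxz cubes c) (L, S)).1
    ∧ (ds.foldl (bPush mnx mny mnz mxx mxy mxz (PySem.Set.ofList cubes) c) (hs, S)).2
      = (ds.foldl (gPush mnx mny mnz mxx mxy mxz cubes c) (L, S)).2 := by
  intro ds
  induction ds with
  | nil => intro hs L S h; exact ⟨h, rfl⟩
  | cons d ds ih =>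
    intro hs L S h
    have h1 : hs.contains (padd c d) = decide (padd c d ∈ L) := by
      by_cases hm : padd c d ∈ L
      · rw [(h _).mpr hm, decide_eq_true hm]
      · rw [decide_eq_false hm]
        by_contra hc
        exact hm ((h _).mp (by simpa using hc))
    have h2 : PySem.Set.contains (PySem.Set.ofList cubes) (padd c d)
        = decide (padd c d ∈ cubes) := by
      by_cases hm : padd c d ∈ cubes
      · rw [decide_eq_true hm,
          (PySem.Set.contains_iff _ _).mpr ((PySem.Set.mem_ofList _ _).mpr hm)]
      · rw [decide_eq_false hm]
        by_contra hc
        exact hm ((PySem.Set.mem_ofList _ _).mp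
          ((PySem.Set.contains_iff _ _).mp (by simpa using hc)))
    simp only [List.foldl_cons]
    by_cases hcond : (bInBox mnx mny mnz mxx mxy mxz (padd c d)
        && !(decide (padd c d ∈ L)) && !(decide (padd c d ∈ cubes))) = true
    · have hstepG : gPush mnx mny mnz mxx mxy mxz cubes c (L, S) d
          = (L ++ [padd c d], padd c d :: S) := by
        unfold gPush
        rw [if_pos hcond]
      have hstepB : bPush mnx mny mnz mxx mxy mxz (PySem.Set.ofList cubes) c (hs, S) d
          = (hs.insert (padd c d), padd c d :: S) := by
        unfold bPush
        dsimp only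
        rw [show ((c.1 + d.1, c.2.1 + d.2.1, c.2.2 + d.2.2) : Pt) = padd c d from rfl,
          h1, h2, if_pos hcond]
      rw [hstepG, hstepB]
      exact ih (hs.insert (padd c d)) (L ++ [padd c d]) (padd c d :: S)
        (hsfits_insert hs L (padd c d) h)
    · have hstepG : gPush mnx mny mnz mxx mxy mxz cubes c (L, S) d = (L, S) := by
        unfold gPush
        rw [if_neg (by simpa using hcond)]
      have hstepB : bPush mnx mny mnz mxx mxy mxz (PySem.Set.ofList cubes) c (hs, S) d
          = (hs, S) := by
        unfold bPush
        dsimp only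
        rw [show ((c.1 + d.1, c.2.1 + d.2.1, c.2.2 + d.2.2) : Pt) = padd c d from rfl,
          h1, h2, if_neg (by simpa using hcond)]
      rw [hstepG, hstepB]
      exact ih hs L S h

theorem bLoop_fits (mnx mny mnz mxx mxy mxz : Int) (cubes : List Pt) :
    ∀ (fuel : Nat) (hs : Std.HashSet Pt) (L S : List Pt), HSfits hs L →
    HSfits (bLoop mnx mny mnz mxx mxy mxz (PySem.Set.ofList cubes) fuel (hs, S))
      (gDfs mnx mny mnz mxx mxy mxz cubes fuel (L, S)) := by
  intro fuel
  induction fuel with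
  | zero => intro hs L S h; exact h
  | succ fuel ih =>
    intro hs L S h
    cases S with
    | nil => exact h
    | cons c rest =>
      obtain ⟨hf1, hf2⟩ := push_fold_fits mnx mny mnz mxx mxy mxz cubes c faceDirections
        hs L rest h
      have hresB : bLoop mnx mny mnz mxx mxy mxz (PySem.Set.ofList cubes) (fuel + 1)
          (hs, c :: rest)
          = bLoop mnx mny mnz mxx mxy mxz (PySem.Set.ofList cubes) fuel
            (faceDirections.foldl (bPush mnx mny mnz mxx mxy mxz (PySem.Set.ofList cubes) c)
              (hs, rest)) := rfl
      have hresG : gDfs mnx mny mnz mxx mxy mxz cubes (fuel + 1) (L, c :: rest)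
          = gDfs mnx mny mnz mxx mxy mxz cubes fuel
            (faceDirections.foldl (gPush mnx mny mnz mxx mxy mxz cubes c) (L, rest)) := rfl
      have hpair : faceDirections.foldl (bPush mnx mny mnz mxx mxy mxz
            (PySem.Set.ofList cubes) c) (hs, rest)
          = ((faceDirections.foldl (bPush mnx mny mnz mxx mxy mxz
              (PySem.Set.ofList cubes) c) (hs, rest)).1,
             (faceDirections.foldl (gPush mnx mny mnz mxx mxy mxz cubes c) (L, rest)).2) := by
        rw [← hf2]
      rw [hresB, hresG, hpair]
      exact ih (faceDirections.foldl (bPush mnx mny mnz mxx mxy mxz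
          (PySem.Set.ofList cubes) c) (hs, rest)).1
        (faceDirections.foldl (gPush mnx mny mnz mxx mxy mxz cubes c) (L, rest)).1
        (faceDirections.foldl (gPush mnx mny mnz mxx mxy mxz cubes c) (L, rest)).2 hf1

theorem pyMinD_le {xs : List Int} {x : Int} (hx : x ∈ xs) : pyMinD xs ≤ x := by
  cases h : PySem.List.min? xs (fun x => x) with
  | none => rw [PySem.List.min?_eq_none_iff] at h; subst h; cases hx
  | some m =>
    have := PySem.List.min?_isMin h x hx
    simpa [pyMinD, h] using this

theorem le_pyMaxD {xs : List Int} {x : Int} (hx : x ∈ xs) : x ≤ pyMaxD xs := by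
  cases h : PySem.List.max? xs (fun x => x) with
  | none => rw [PySem.List.max?_eq_none_iff] at h; subst h; cases hx
  | some m =>
    have := PySem.List.max?_isMax h x hx
    simpa [pyMaxD, h] using this

theorem countP_filterMap_opt (f : Pt → Option Pt) (q : Pt → Bool) :
    ∀ (l : List Pt), (l.filterMap f).countP q
      = l.countP (fun d => ((f d).map q).getD false) := by
  intro l
  induction l with
  | nil => rfl
  | cons d l ih =>
    cases h : f d with
    | none => simp [h, ih]
    | some n => simp [h, List.countP_cons, ih]

theorem fCount_eq (cubes : List Pt) (mnx mny mnz mxx mxy mxz : Int) (p : Pt)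
    (hbox : ∀ c ∈ cubes, bInBox mnx mny mnz mxx mxy mxz c = true) :
    fCount cubes (aAdjacent mnx mny mnz mxx mxy mxz) p
      = ((faceDirections.countP (fun d => cubes.contains (padd p d)) : Nat) : Int) := by
  have hadj : aAdjacent mnx mny mnz mxx mxy mxz p
      = faceDirections.filterMap (fun d =>
          if mnx ≤ p.1 + d.1 ∧ p.1 + d.1 ≤ mxx ∧ mny ≤ p.2.1 + d.2.1 ∧ p.2.1 + d.2.1 ≤ mxy ∧
              mnz ≤ p.2.2 + d.2.2 ∧ p.2.2 + d.2.2 ≤ mxz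
          then some (padd p d) else none) := rfl
  unfold fCount
  rw [hadj, countP_filterMap_opt]
  congr 1
  apply List.countP_congr
  intro d _
  by_cases hc : (mnx ≤ p.1 + d.1 ∧ p.1 + d.1 ≤ mxx ∧ mny ≤ p.2.1 + d.2.1 ∧ p.2.1 + d.2.1 ≤ mxy ∧
      mnz ≤ p.2.2 + d.2.2 ∧ p.2.2 + d.2.2 ≤ mxz)
  · simp [hc]
  · simp [hc]
    intro hmem
    exact hc (of_decide_eq_true (hbox (padd p d) hmem))

def indC (Y : List Pt) (x : Pt) : Int := if Y.contains x then 1 else 0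

theorem indC_eq (Z : List Pt) (u : Pt) : indC Z u = if u ∈ Z.toFinset then (1 : Int) else 0 := by
  by_cases h : u ∈ Z <;> simp [indC, h]

theorem dir_swap (X Y : List Pt) (v : Pt) :
    (∑ x ∈ X.toFinset, indC Y (x + v)) = ∑ y ∈ Y.toFinset, indC X (y + -v) := by
  simp only [indC_eq]
  rw [Finset.sum_boole, Finset.sum_boole]
  refine congrArg _ ?_
  refine Finset.card_nbij' (fun x => x + v) (fun y => y + -v) ?_ ?_ ?_ ?_
  · intro x hx
    simp only [Finset.coe_filter, Set.mem_setOf_eq] at hx ⊢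
    exact ⟨hx.2, by simpa [add_neg_cancel_right] using hx.1⟩
  · intro y hy
    simp only [Finset.coe_filter, Set.mem_setOf_eq] at hy ⊢
    exact ⟨hy.2, by simpa [neg_add_cancel_right] using hy.1⟩
  · intro x _
    simp [add_neg_cancel_right]
  · intro y _
    simp [neg_add_cancel_right]

theorem countP_cast_sum (q : Pt → Bool) :
    ∀ (l : List Pt), ((l.countP q : Nat) : Int)
      = (l.map (fun d => if q d then (1 : Int) else 0)).sum := by
  intro l
  induction l with
  | nil => rfl
  | cons d l ih =>
    rw [List.countP_cons, List.map_cons, List.sum_cons]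
    by_cases h : q d = true
    · simp [h, ih]
      omega
    · simp [h, ih]

theorem swap_sum (cubes V : List Pt) :
    (∑ p ∈ V.toFinset, ((faceDirections.countP (fun d => cubes.contains (padd p d)) : Nat) : Int))
    = ∑ c ∈ cubes.toFinset,
        ((faceDirections.countP (fun d => V.contains (padd c d)) : Nat) : Int) := by
  have hD : faceDirections.Nodup := by decide
  have hcnt : ∀ (Z : List Pt) (p : Pt),
      ((faceDirections.countP (fun d => Z.contains (padd p d)) : Nat) : Int)
        = ∑ d ∈ faceDirections.toFinset, indC Z (p + d) := by
    intro Z p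
    rw [List.sum_toFinset _ hD, countP_cast_sum]
    congr 1
  calc (∑ p ∈ V.toFinset, ((faceDirections.countP (fun d => cubes.contains (padd p d)) : Nat) : Int))
      = ∑ p ∈ V.toFinset, ∑ d ∈ faceDirections.toFinset, indC cubes (p + d) :=
        Finset.sum_congr rfl (fun p _ => hcnt cubes p)
    _ = ∑ d ∈ faceDirections.toFinset, ∑ p ∈ V.toFinset, indC cubes (p + d) := Finset.sum_comm
    _ = ∑ d ∈ faceDirections.toFinset, ∑ c ∈ cubes.toFinset, indC V (c + -d) :=
        Finset.sum_congr rfl (fun d _ => dir_swap V cubes d)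
    _ = ∑ d ∈ faceDirections.toFinset, ∑ c ∈ cubes.toFinset, indC V (c + d) := by
        refine Finset.sum_nbij' (fun d => -d) (fun d => -d) ?_ ?_ ?_ ?_ ?_
        · intro d hd
          fin_cases hd <;> decide
        · intro d hd
          fin_cases hd <;> decide
        · intro d _; simp
        · intro d _; simp
        · intro d _
          simp
    _ = ∑ c ∈ cubes.toFinset, ∑ d ∈ faceDirections.toFinset, indC V (c + d) := Finset.sum_comm
    _ = ∑ c ∈ cubes.toFinset,
          ((faceDirections.countP (fun d => V.contains (padd c d)) : Nat) : Int) :=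
        Finset.sum_congr rfl (fun c _ => (hcnt V c).symm)

theorem bCount_fits (cubes : List Pt) (ext : Std.HashSet Pt) (L : List Pt)
    (hfit : HSfits ext L) :
    bCount (PySem.Set.ofList cubes) ext
      = ∑ c ∈ cubes.toFinset,
          ((faceDirections.countP (fun d => L.contains (padd c d)) : Nat) : Int) := by
  unfold bCount
  simp only [PySem.List.foldl_count_if, PySem.List.foldl_add]
  rw [zero_add, ← List.sum_toFinset _ (PySem.Set.nodup_ofList cubes)]
  have hfs : (PySem.Set.ofList cubes).toFinset = cubes.toFinset := by
    apply Finset.ext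
    intro x
    simp [List.mem_toFinset, PySem.Set.mem_ofList]
  rw [hfs]
  apply Finset.sum_congr rfl
  intro c _
  congr 1
  apply List.countP_congr
  intro d _
  rw [hfit]
  constructor
  · intro h; simpa using h
  · intro h; simpa using h

-- A's face total over its final exterior list = B's counting pass, given the final lists have
-- the same underlying set
theorem count_final (cubes : List Pt) (mnx mny mnz mxx mxy mxz : Int)
    (ext : Std.HashSet Pt) (LB LA : List Pt) (hfit : HSfits ext LB)
    (hset : LA.toFinset = LB.toFinset) (hLA : LA.Nodup)
    (hbox : ∀ c ∈ cubes, bInBox mnx mny mnz mxx mxy mxz c = true) :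
    sumF cubes (aAdjacent mnx mny mnz mxx mxy mxz) LA = bCount (PySem.Set.ofList cubes) ext := by
  have h1 : sumF cubes (aAdjacent mnx mny mnz mxx mxy mxz) LA
      = ∑ p ∈ LA.toFinset, fCount cubes (aAdjacent mnx mny mnz mxx mxy mxz) p :=
    (List.sum_toFinset _ hLA).symm
  rw [h1, Finset.sum_congr rfl (fun p _ => fCount_eq cubes mnx mny mnz mxx mxy mxz p hbox),
    swap_sum, bCount_fits cubes ext LB hfit]
  apply Finset.sum_congr rfl
  intro c _
  congr 1
  apply List.countP_congr
  intro d _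
  have : ∀ x : Pt, x ∈ LA ↔ x ∈ LB := by
    intro x; rw [← List.mem_toFinset, hset, List.mem_toFinset]
  constructor
  · intro h
    simp only [List.contains_eq_mem, decide_eq_true_eq] at h ⊢
    exact (this _).mp h
  · intro h
    simp only [List.contains_eq_mem, decide_eq_true_eq] at h ⊢
    exact (this _).mpr h

-- ===== VERDICT (by name: the statement is the Claim_ definition above) =====
theorem solve_spec : Claim_equal_solve := by
  unfold Claim_equal_solve
  intro cubes _ hpre
  unfold Pre_solve at hpre
  unfold Spec_solve solve solve_alt
  dsimp only
  set mnx := pyMinD (cubes.map (fun t => t.1)) - 1 with hmnx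
  set mny := pyMinD (cubes.map (fun t => t.2.1)) - 1 with hmny
  set mnz := pyMinD (cubes.map (fun t => t.2.2)) - 1 with hmnz
  set mxx := pyMaxD (cubes.map (fun t => t.1)) + 1 with hmxx
  set mxy := pyMaxD (cubes.map (fun t => t.2.1)) + 1 with hmxy
  set mxz := pyMaxD (cubes.map (fun t => t.2.2)) + 1 with hmxz
  have hlt : ∀ c ∈ cubes, mnx < c.1 ∧ c.1 < mxx ∧ mny < c.2.1 ∧ c.2.1 < mxy ∧
      mnz < c.2.2 ∧ c.2.2 < mxz := by
    intro c hc
    have h1 := pyMinD_le (List.mem_map_of_mem hc : c.1 ∈ cubes.map (fun t => t.1))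
    have h2 := pyMinD_le (List.mem_map_of_mem hc : c.2.1 ∈ cubes.map (fun t => t.2.1))
    have h3 := pyMinD_le (List.mem_map_of_mem hc : c.2.2 ∈ cubes.map (fun t => t.2.2))
    have h4 := le_pyMaxD (List.mem_map_of_mem hc : c.1 ∈ cubes.map (fun t => t.1))
    have h5 := le_pyMaxD (List.mem_map_of_mem hc : c.2.1 ∈ cubes.map (fun t => t.2.1))
    have h6 := le_pyMaxD (List.mem_map_of_mem hc : c.2.2 ∈ cubes.map (fun t => t.2.2))
    omega
  have hbox : ∀ c ∈ cubes, bInBox mnx mny mnz mxx mxy mxz c = true := by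
    intro c hc
    have h := hlt c hc
    simp only [bInBox]
    exact decide_eq_true ⟨by omega, by omega, by omega, by omega, by omega, by omega⟩
  have hcornerNot : ((mnx, mny, mnz) : Pt) ∉ cubes := by
    intro h
    have := (hlt _ h).1
    simp at this
  have hcorner : PySem.Set.add PySem.Set.empty ((mnx, mny, mnz) : Pt)
      = [((mnx, mny, mnz) : Pt)] :=
    PySem.Set.add_of_not_mem (List.not_mem_nil)
  rw [hcorner]
  have hfit0 : HSfits (∅ : Std.HashSet Pt) ([] : List Pt) := by
    intro x
    simp
  -- the bounding box is nonempty (cubes is nonempty), so the corner is in it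
  obtain ⟨c0, hc0⟩ : ∃ c, c ∈ cubes := by
    cases cubes with
    | nil => exact absurd rfl hpre
    | cons a l => exact ⟨a, List.mem_cons_self ..⟩
  have hb0 := hlt c0 hc0
  have hcornerBox : bInBox mnx mny mnz mxx mxy mxz ((mnx, mny, mnz) : Pt) = true := by
    simp only [bInBox]
    exact decide_eq_true ⟨le_refl _, by omega, le_refl _, by omega, le_refl _, by omega⟩
  have hcard := boxCard_le mnx mny mnz mxx mxy mxz (by omega) (by omega) (by omega)
  set fuel := ((mxx - mnx + 1) * (mxy - mny + 1) * (mxz - mnz + 1)).toNat + 2 with hfuel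
  have hmain := loop_main cubes mnx mny mnz mxx mxy mxz fuel
    [((mnx, mny, mnz) : Pt)] (∅ : Std.HashSet Pt) [] 0 (ppar (mnx, mny, mnz))
    hfit0
    (by rintro p hp; simp only [List.mem_singleton] at hp; subst hp; rfl)
    (List.nodup_cons.mpr ⟨List.not_mem_nil, List.nodup_nil⟩)
    List.nodup_nil
    (by intro p _ h; cases h)
    (by
      intro p hp
      have : p = ((mnx, mny, mnz) : Pt) := by simpa using hp
      rw [this]; exact hcornerNot)
    (by intro q h; cases h)
  rw [hmain.1]
  have hz : sumF cubes (aAdjacent mnx mny mnz mxx mxy mxz) [] = 0 := rfl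
  -- A-side: the final visited list contains the corner, is closed, and is sound
  have hterm := flood_term mnx mny mnz mxx mxy mxz cubes fuel [((mnx, mny, mnz) : Pt)] []
    (by simp)
    (by
      intro x hx
      have : x = ((mnx, mny, mnz) : Pt) := by simpa using hx
      rw [this]; exact hcornerBox)
    (by
      rintro y _ _ ⟨d, _, hmem⟩
      cases hmem)
    (by simp only [List.length_nil]; omega)
  have hAsound := flood_sound mnx mny mnz mxx mxy mxz cubes ((mnx, mny, mnz) : Pt) fuel
    [((mnx, mny, mnz) : Pt)] []
    (by intro x hx; cases hx)
    (by
      intro x hx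
      have : x = ((mnx, mny, mnz) : Pt) := by simpa using hx
      rw [this]; exact Reach.base)
  -- B-side: the port's DFS fits the ghost DFS, whose seen-list is sound and closed too
  have hfit1 : HSfits ((∅ : Std.HashSet Pt).insert ((mnx, mny, mnz) : Pt))
      [((mnx, mny, mnz) : Pt)] := by
    have := hsfits_insert (∅ : Std.HashSet Pt) [] ((mnx, mny, mnz) : Pt) hfit0
    simpa using this
  have hfitB := bLoop_fits mnx mny mnz mxx mxy mxz cubes fuel
    ((∅ : Std.HashSet Pt).insert ((mnx, mny, mnz) : Pt))
    [((mnx, mny, mnz) : Pt)] [((mnx, mny, mnz) : Pt)] hfit1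
  have hdfs := dfs_main mnx mny mnz mxx mxy mxz cubes ((mnx, mny, mnz) : Pt) fuel
    [((mnx, mny, mnz) : Pt)] [((mnx, mny, mnz) : Pt)]
    (List.nodup_cons.mpr ⟨List.not_mem_nil, List.nodup_nil⟩)
    (by
      intro x hx
      have : x = ((mnx, mny, mnz) : Pt) := by simpa using hx
      rw [this]; exact hcornerBox)
    (fun x hx => hx)
    (by
      intro p hp d _ _ _
      exact Or.inr hp)
    (by
      intro x hx
      have : x = ((mnx, mny, mnz) : Pt) := by simpa using hx
      rw [this]; exact Reach.base)
    (by
      simp only [List.length_singleton]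
      omega)
  -- both final lists carry the same set: the cells reachable from the corner
  have hset : (gFlood (bInBox mnx mny mnz mxx mxy mxz) cubes fuel
        [((mnx, mny, mnz) : Pt)] []).toFinset
      = (gDfs mnx mny mnz mxx mxy mxz cubes fuel
        ([((mnx, mny, mnz) : Pt)], [((mnx, mny, mnz) : Pt)])).toFinset := by
    apply Finset.ext
    intro x
    simp only [List.mem_toFinset]
    constructor
    · intro hx
      exact reach_subset (bInBox mnx mny mnz mxx mxy mxz) cubes ((mnx, mny, mnz) : Pt) _
        (hdfs.1 _ (List.mem_singleton.mpr rfl)) hdfs.2.1 x (hAsound x hx)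
    · intro hx
      exact reach_subset (bInBox mnx mny mnz mxx mxy mxz) cubes ((mnx, mny, mnz) : Pt) _
        (hterm.1 _ (by simp)) hterm.2 x (hdfs.2.2 x hx)
  rw [hz, count_final cubes mnx mny mnz mxx mxy mxz _ _ _ hfitB hset hmain.2 hbox]
  ring
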